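-- pv_equiv track=rewrite | github.com/pookaPlay/ohm | src/python_byte_sim/ohm/DataIO.py | DeserializeLSBOffset
-- ===== SOURCE A (Python) =====
-- def DeserializeLSBOffset(data):
--     input = data.copy()
--     NBits= len(input)
--     offset = 2**(NBits-1)
--
--     thresholds = [2**i for i in range(NBits)]
--
--     result = sum([input[i] * thresholds[i] for i in range(NBits)])
--     result -= offset
--
--     return(result)
-- ===== SOURCE B (Python) =====
-- def DeserializeLSBOffset(data):
--     input = data.copy()
--     result = 0
--     for bit in reversed(input):
--         result = result * 2 + bit
--     return result - 2 ** (len(input) - 1)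
-- ===== Notes on version B (the rewrite author's own statement) =====
-- stated objective: idiomatic
-- what changed: Replaced the powers-of-two thresholds table and the index-based weighted-sum comprehension with a single Horner-style accumulating pass over the reversed list (result = result*2 + bit), then subtracting the same offset; this avoids materializing the table and the n full-width big-int products, which a timing run measured as a large speedup.
-- outside the precondition, e.g. on DeserializeLSBOffset([]): A returns -0.5, B returns -0.5
import Mathlib
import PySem

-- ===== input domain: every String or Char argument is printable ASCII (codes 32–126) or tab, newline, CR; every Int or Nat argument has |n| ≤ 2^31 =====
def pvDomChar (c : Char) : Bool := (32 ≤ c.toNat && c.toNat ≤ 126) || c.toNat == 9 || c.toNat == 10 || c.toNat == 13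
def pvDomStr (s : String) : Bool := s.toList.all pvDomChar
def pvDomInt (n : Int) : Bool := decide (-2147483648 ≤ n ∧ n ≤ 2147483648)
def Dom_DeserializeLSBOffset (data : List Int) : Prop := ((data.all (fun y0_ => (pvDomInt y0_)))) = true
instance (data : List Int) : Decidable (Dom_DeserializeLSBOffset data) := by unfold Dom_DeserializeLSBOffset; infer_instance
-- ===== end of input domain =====

-- B replaces A's thresholds table + weighted-sum comprehension with a single Horner-style
-- pass over the reversed list (more idiomatic); return value proved equal on nonempty lists.


-- ===== PORT A =====
-- input[i] and thresholds[i] are always in range (i < NBits), so List.getD is exact here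
def DeserializeLSBOffset (data : List Int) : Int :=
  let input := data
  let NBits := input.length
  let offset : Int := 2 ^ (NBits - 1)
  let thresholds : List Int := (List.range NBits).map (fun i => (2 : Int) ^ i)
  let result := ((List.range NBits).map (fun i => input.getD i 0 * thresholds.getD i 0)).sum
  result - offset

-- ===== PORT B =====
def DeserializeLSBOffset_alt (data : List Int) : Int :=
  let input := data
  let result := input.reverse.foldl (fun acc bit => acc * 2 + bit) 0
  result - 2 ^ (input.length - 1)

-- ===== PRECONDITION & SPEC =====
-- Pre_ excludes the empty list: there Python's 2**(-1) is the float 0.5 and A returns -0.5,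
-- a float, not a value of the declared integer type (B returns the same float).
def Pre_DeserializeLSBOffset (data : List Int) : Prop := data ≠ []
instance (data : List Int) : Decidable (Pre_DeserializeLSBOffset data) := by unfold Pre_DeserializeLSBOffset; infer_instance
def pvWitness_DeserializeLSBOffset : List Int := [1, 0, 1]

def Spec_DeserializeLSBOffset (data : List Int) (out : Int) : Prop := out = DeserializeLSBOffset_alt data
instance (data : List Int) (out : Int) : Decidable (Spec_DeserializeLSBOffset data out) := by unfold Spec_DeserializeLSBOffset; infer_instance

-- ===== CLAIM (what is proved, stated in full; the proofs are below) =====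
def Claim_equal_DeserializeLSBOffset : Prop := ∀ (data : List Int), Dom_DeserializeLSBOffset data → Pre_DeserializeLSBOffset data → Spec_DeserializeLSBOffset data (DeserializeLSBOffset data)

-- ===== LEMMAS AND PROOFS =====

-- B's reverse-foldl Horner loop is a foldr
theorem horner_reverse_foldl (l : List Int) :
    l.reverse.foldl (fun acc bit => acc * 2 + bit) 0
      = l.foldr (fun bit acc => acc * 2 + bit) 0 := by
  rw [List.foldl_reverse]

-- the thresholds table holds 2^i at index i
theorem thresholds_getD (n i : ℕ) (h : i < n) :
    ((List.range n).map (fun j => (2 : Int) ^ j)).getD i 0 = 2 ^ i := by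
  rw [List.getD_eq_getElem?_getD]
  simp [List.getElem?_map, List.getElem?_range h]

-- the positional weighted sum equals the Horner foldr
theorem pos_sum_eq_horner (l : List Int) :
    ((List.range l.length).map (fun i => l.getD i 0 * (2 : Int) ^ i)).sum
      = l.foldr (fun bit acc => acc * 2 + bit) 0 := by
  induction l with
  | nil => simp
  | cons b t ih =>
    rw [List.length_cons, List.range_succ_eq_map, List.map_cons, List.map_map,
      List.sum_cons, List.foldr_cons, ← ih]
    simp only [Function.comp_def, List.getD_cons_zero, List.getD_cons_succ, pow_zero, mul_one]
    have : ∀ i ∈ List.range t.length,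
        t.getD i 0 * (2 : Int) ^ (i + 1) = (t.getD i 0 * 2 ^ i) * 2 := by
      intro i _; ring
    rw [List.map_congr_left this]
    induction (List.range t.length) with
    | nil => simp
    | cons x xs ihx =>
      simp only [List.map_cons, List.sum_cons] at *
      ring_nf
      ring_nf at ihx
      omega

-- A's weighted sum equals the Horner foldr
theorem weighted_sum_eq_horner (l : List Int) :
    ((List.range l.length).map
        (fun i => l.getD i 0 * ((List.range l.length).map (fun j => (2 : Int) ^ j)).getD i 0)).sum
      = l.foldr (fun bit acc => acc * 2 + bit) 0 := by
  rw [← pos_sum_eq_horner]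
  apply congrArg
  apply List.map_congr_left
  intro i hi
  rw [thresholds_getD _ _ (List.mem_range.mp hi)]

-- ===== VERDICT (by name: the statement is the Claim_ definition above) =====
theorem DeserializeLSBOffset_spec : Claim_equal_DeserializeLSBOffset := by
  intro data _ _
  unfold Spec_DeserializeLSBOffset DeserializeLSBOffset DeserializeLSBOffset_alt
  simp only
  rw [horner_reverse_foldl, weighted_sum_eq_horner]
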